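-- pv_equiv track=rewrite | github.com/CognitiveComputingResearchGroup/sudoku | sudoku_strategies.py | unique_in_cells
-- ===== SOURCE A (Python) =====
-- def unique_in_cells(cells, puzzle, possibles):
--     """ unique_in_cells(cells, puzzle, possibles):
--         Find unique values in a group of cells.
--         Returns a dictionary with the unique
--         value(s), keyed on the cell(s) to be solved."""
--
--     if len(cells) < 2:
--         return dict()
--
--     cell_sets = dict()
--     def _copy_cell_sets():
--         copy = dict()
--         for cell in cell_sets:
--             copy[cell] = cell_sets[cell].copy()
--         return copy
--
--     for cell in cells:
--         row, col = cell
--         if puzzle[row][col]: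
--             continue
--         cell_sets[cell] = possibles[row][col].copy()
--     unique = dict()
--     for cell in cell_sets:
--         cs_copy = _copy_cell_sets()
--         cell_set = cs_copy.pop(cell)
--         for k in cs_copy:
--             cell_set = cell_set - cs_copy[k]
--             if not len(cell_set):
--                 break
--         if len(cell_set):
--             unique[cell] = cell_set.pop()
--             # TODO: If cell_set is not now empty,
--             #       throw an exception
--     return unique
-- ===== SOURCE B (Python) =====
-- def unique_in_cells(cells, puzzle, possibles):
--     """Frequency-count rewrite: dedup the unfilled cells once, count
--     candidate-value occurrences across them in a single pass, then emit
--     per cell the value whose count is 1."""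
--     if len(cells) < 2:
--         return dict()
--     unfilled = list(dict.fromkeys(c for c in cells if not puzzle[c[0]][c[1]]))
--     counts = {}
--     for r, c in unfilled:
--         for v in possibles[r][c]:
--             counts[v] = counts.get(v, 0) + 1
--     def first_single(cell):
--         return next((v for v in possibles[cell[0]][cell[1]] if counts[v] == 1), None)
--     return {cell: v for cell in unfilled if (v := first_single(cell)) is not None}
-- ===== Notes on version B (the rewrite author's own statement) =====
-- stated objective: alternative
-- what changed: A subtracts every other cell's candidate set from each cell's set, copying the whole dict of sets once per cell; B dedups the unfilled cells once, makes one frequency count of all their candidate values, and emits for each cell the first candidate whose count is 1 via a dict comprehension.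
import Mathlib
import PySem

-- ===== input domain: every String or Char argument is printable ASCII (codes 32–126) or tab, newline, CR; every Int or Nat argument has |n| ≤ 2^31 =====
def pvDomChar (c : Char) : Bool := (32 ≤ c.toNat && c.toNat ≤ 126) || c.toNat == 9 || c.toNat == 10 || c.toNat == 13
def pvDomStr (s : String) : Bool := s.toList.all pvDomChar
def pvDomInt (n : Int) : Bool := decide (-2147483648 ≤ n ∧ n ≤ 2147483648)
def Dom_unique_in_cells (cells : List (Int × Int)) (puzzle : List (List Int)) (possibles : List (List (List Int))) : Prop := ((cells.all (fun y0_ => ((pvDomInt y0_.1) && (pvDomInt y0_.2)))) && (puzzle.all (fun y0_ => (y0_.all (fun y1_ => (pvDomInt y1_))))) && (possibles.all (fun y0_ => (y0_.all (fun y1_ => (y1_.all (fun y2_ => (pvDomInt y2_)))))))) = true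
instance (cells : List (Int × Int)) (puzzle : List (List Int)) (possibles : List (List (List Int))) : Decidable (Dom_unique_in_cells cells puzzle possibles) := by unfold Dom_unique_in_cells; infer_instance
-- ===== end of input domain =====

-- B replaces A's per-cell subtraction of every other cell's candidate set (with a
-- full dict-of-sets copy per cell) by one dedup of the unfilled cells, one frequency
-- count of all their candidate values, and a first-count==1 pick per cell.

-- ===== PORT A =====
-- inner loop 'for k in cs_copy: cell_set = cell_set - cs_copy[k]; if not len(cell_set): break'
def pvDiffLoopA : PySem.Set Int → List ((Int × Int) × List Int) → PySem.Set Int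
  | s, [] => s
  | s, kv :: rest =>
    let s' := PySem.Set.diff s kv.2
    if s'.length = 0 then s' else pvDiffLoopA s' rest

def unique_in_cells (cells : List (Int × Int)) (puzzle : List (List Int)) (possibles : List (List (List Int))) : List (Int × Int × Int) :=
  if cells.length < 2 then [] else
  -- for cell in cells: skip filled, cell_sets[cell] = possibles[row][col].copy()
  let cell_sets : PySem.Dict (Int × Int) (List Int) :=
    cells.foldl (fun d cell =>
      if PySem.List.pyGetD (PySem.List.pyGetD puzzle cell.1 []) cell.2 0 ≠ 0 then d
      else d.insert cell (PySem.Set.ofList (PySem.List.pyGetD (PySem.List.pyGetD possibles cell.1 []) cell.2 [])))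
      PySem.Dict.empty
  let unique : PySem.Dict (Int × Int) Int :=
    cell_sets.keys.foldl (fun u cell =>
      -- cs_copy = copy of cell_sets; cell_set = cs_copy.pop(cell)
      let cell_set := pvDiffLoopA (cell_sets.getD cell []) (cell_sets.erase cell).items
      if cell_set.length ≠ 0 then
        -- cell_set.pop(): exact for ≤ 1-element sets, which Pre_ guarantees
        u.insert cell (cell_set.headD 0)
      else u) PySem.Dict.empty
  unique.items.map (fun kv => (kv.1.1, kv.1.2, kv.2))

-- ===== PORT B =====
def unique_in_cells_alt (cells : List (Int × Int)) (puzzle : List (List Int)) (possibles : List (List (List Int))) : List (Int × Int × Int) :=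
  if cells.length < 2 then [] else
  -- unfilled = list(dict.fromkeys(c for c in cells if not puzzle[c[0]][c[1]]))
  let unfilled : List (Int × Int) :=
    PySem.Set.ofList (cells.filter (fun c => PySem.List.pyGetD (PySem.List.pyGetD puzzle c.1 []) c.2 0 == 0))
  -- counts[v] = counts.get(v, 0) + 1 over the candidate values of every unfilled cell
  let counts : PySem.Dict Int Int :=
    unfilled.foldl (fun cnt c =>
      (PySem.Set.ofList (PySem.List.pyGetD (PySem.List.pyGetD possibles c.1 []) c.2 [])).foldl
        (fun cnt v => cnt.modify v 0 (· + 1)) cnt) PySem.Dict.empty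
  -- {cell: v for cell in unfilled if (v := first_single(cell)) is not None}
  -- the unfilled cells are distinct, so the dict comprehension is this filterMap;
  -- first_single = first candidate with count 1 (exact: Pre_ guarantees at most one)
  unfilled.filterMap (fun c =>
    ((PySem.Set.ofList (PySem.List.pyGetD (PySem.List.pyGetD possibles c.1 []) c.2 [])).find?
      (fun v => counts.getD v 0 == 1)).map (fun v => (c.1, c.2, v)))

-- ===== PRECONDITION & SPEC =====
-- helpers for Pre_ (independent of the ports)
def pvUnfilled (cells : List (Int × Int)) (puzzle : List (List Int)) : List (Int × Int) :=
  PySem.Set.ofList (cells.filter (fun c => PySem.List.pyGetD (PySem.List.pyGetD puzzle c.1 []) c.2 0 == 0))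

def pvCand (possibles : List (List (List Int))) (c : Int × Int) : List Int :=
  PySem.Set.ofList (PySem.List.pyGetD (PySem.List.pyGetD possibles c.1 []) c.2 [])

-- Pre_ excludes (a) inputs with an out-of-range cell index, on which A raises IndexError,
-- and (b) inputs where some unfilled cell has TWO OR MORE candidate values found in no other
-- unfilled cell: there A (and B) return an arbitrary element chosen by set.pop()'s hash order,
-- an accident of CPython's set implementation that no port can model.
def Pre_unique_in_cells (cells : List (Int × Int)) (puzzle : List (List Int)) (possibles : List (List (List Int))) : Prop :=
  cells.length < 2 ∨
  ((∀ c ∈ cells,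
      PySem.Raise.InRange puzzle.length c.1 ∧
      PySem.Raise.InRange (PySem.List.pyGetD puzzle c.1 []).length c.2 ∧
      (PySem.List.pyGetD (PySem.List.pyGetD puzzle c.1 []) c.2 0 = 0 →
        PySem.Raise.InRange possibles.length c.1 ∧
        PySem.Raise.InRange (PySem.List.pyGetD possibles c.1 []).length c.2)) ∧
   ∀ c ∈ pvUnfilled cells puzzle,
     ((pvCand possibles c).filter (fun v =>
        (pvUnfilled cells puzzle).all (fun c' => c' == c || !((pvCand possibles c').contains v)))).length ≤ 1)

instance (cells : List (Int × Int)) (puzzle : List (List Int)) (possibles : List (List (List Int))) : Decidable (Pre_unique_in_cells cells puzzle possibles) := by unfold Pre_unique_in_cells; infer_instance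

def pvWitness_unique_in_cells : (List (Int × Int)) × List (List Int) × List (List (List Int)) :=
  ([(0, 0), (0, 1)], [[0, 0]], [[[1, 2], [2, 3]]])

def Spec_unique_in_cells (cells : List (Int × Int)) (puzzle : List (List Int)) (possibles : List (List (List Int))) (out : List (Int × Int × Int)) : Prop := out = unique_in_cells_alt cells puzzle possibles
instance (cells : List (Int × Int)) (puzzle : List (List Int)) (possibles : List (List (List Int))) (out : List (Int × Int × Int)) : Decidable (Spec_unique_in_cells cells puzzle possibles out) := by unfold Spec_unique_in_cells; infer_instance

-- ===== CLAIM (what is proved, stated in full; the proofs are below) =====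
def Claim_equal_unique_in_cells : Prop := ∀ (cells : List (Int × Int)) (puzzle : List (List Int)) (possibles : List (List (List Int))), Dom_unique_in_cells cells puzzle possibles → Pre_unique_in_cells cells puzzle possibles → Spec_unique_in_cells cells puzzle possibles (unique_in_cells cells puzzle possibles)

-- ===== LEMMAS AND PROOFS =====

-- the dict of unfilled cells and their candidate sets, in A's loop shape
def pvBuild (puzzle : List (List Int)) (possibles : List (List (List Int))) (cells : List (Int × Int)) : PySem.Dict (Int × Int) (List Int) :=
  cells.foldl (fun d cell =>
    if PySem.List.pyGetD (PySem.List.pyGetD puzzle cell.1 []) cell.2 0 ≠ 0 then d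
    else d.insert cell (PySem.Set.ofList (PySem.List.pyGetD (PySem.List.pyGetD possibles cell.1 []) cell.2 [])))
    PySem.Dict.empty

-- the per-cell outcome of A's inner loop, as an Option
def pvGA (d : PySem.Dict (Int × Int) (List Int)) (cell : Int × Int) : Option Int :=
  if (pvDiffLoopA (d.getD cell []) (d.erase cell).items).length ≠ 0
  then some ((pvDiffLoopA (d.getD cell []) (d.erase cell).items).headD 0) else none

theorem A_eq (cells : List (Int × Int)) (puzzle : List (List Int)) (possibles : List (List (List Int))) :
    unique_in_cells cells puzzle possibles =
      if cells.length < 2 then [] else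
        ((pvBuild puzzle possibles cells).keys.foldl (fun u cell =>
          let cell_set := pvDiffLoopA ((pvBuild puzzle possibles cells).getD cell [])
            ((pvBuild puzzle possibles cells).erase cell).items
          if cell_set.length ≠ 0 then u.insert cell (cell_set.headD 0) else u)
          PySem.Dict.empty).items.map (fun kv => (kv.1.1, kv.1.2, kv.2)) := rfl

theorem B_eq (cells : List (Int × Int)) (puzzle : List (List Int)) (possibles : List (List (List Int))) :
    unique_in_cells_alt cells puzzle possibles =
      if cells.length < 2 then [] else
        (pvUnfilled cells puzzle).filterMap (fun c =>
          ((pvCand possibles c).find? (fun v =>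
            (((pvUnfilled cells puzzle).foldl (fun cnt c =>
              (pvCand possibles c).foldl (fun cnt v => cnt.modify v 0 (· + 1)) cnt)
              PySem.Dict.empty : PySem.Dict Int Int)).getD v 0 == 1)).map (fun v => (c.1, c.2, v))) := rfl

-- A's conditional-skip fold is the unconditional insert fold over the filtered cells
theorem pvBuild_filter (puzzle : List (List Int)) (possibles : List (List (List Int))) (cells : List (Int × Int)) :
    pvBuild puzzle possibles cells =
      (cells.filter (fun c => PySem.List.pyGetD (PySem.List.pyGetD puzzle c.1 []) c.2 0 == 0)).foldl
        (fun d c => d.insert c (pvCand possibles c)) PySem.Dict.empty := by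
  unfold pvBuild
  rw [List.foldl_filter]
  apply PySem.List.foldl_congr_mem
  intro d c _
  by_cases h : PySem.List.pyGetD (PySem.List.pyGetD puzzle c.1 []) c.2 0 = 0 <;>
    simp [h, pvCand]

theorem pvBuild_keys (puzzle : List (List Int)) (possibles : List (List (List Int))) (cells : List (Int × Int)) :
    (pvBuild puzzle possibles cells).keys = pvUnfilled cells puzzle := by
  rw [pvBuild_filter, PySem.Dict.keys_foldl_insert, PySem.Dict.keys_empty,
    PySem.Set.update_nil_left]
  rfl

theorem pvBuild_nodup (puzzle : List (List Int)) (possibles : List (List (List Int))) (cells : List (Int × Int)) :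
    (pvBuild puzzle possibles cells).keys.Nodup := by
  rw [pvBuild_keys]
  exact PySem.Set.nodup_ofList _

theorem pvBuild_val_aux (possibles : List (List (List Int))) :
    ∀ (l : List (Int × Int)) (d : PySem.Dict (Int × Int) (List Int)),
    (∀ p ∈ d.items, p.2 = pvCand possibles p.1) →
    ∀ p ∈ (l.foldl (fun d c => d.insert c (pvCand possibles c)) d).items, p.2 = pvCand possibles p.1
  | [], _, h => h
  | c :: l, d, h => by
    simp only [List.foldl_cons]
    apply pvBuild_val_aux possibles l
    intro p hp
    rcases (PySem.Dict.mem_items_insert d c _ p).1 hp with rfl | ⟨hp', _⟩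
    · rfl
    · exact h p hp'

theorem pvBuild_val (puzzle : List (List Int)) (possibles : List (List (List Int))) (cells : List (Int × Int)) :
    ∀ p ∈ (pvBuild puzzle possibles cells).items, p.2 = pvCand possibles p.1 := by
  rw [pvBuild_filter]
  apply pvBuild_val_aux
  intro p hp
  simp [PySem.Dict.empty] at hp

-- B's counts dict: getD is the occurrence count over the flattened candidate lists
theorem counts_getD (vals : List (List Int)) (v : Int) :
    (vals.foldl (fun c s => s.foldl (fun c v => c.modify v 0 (· + 1)) c) PySem.Dict.empty).getD v 0
      = (List.count v vals.flatten : Int) := by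
  rw [← List.foldl_flatten, PySem.Dict.getD_foldl_modify_add_one, PySem.Dict.getD_empty]
  simp

theorem count_flatten_eq_countP (v : Int) : ∀ (ps : List ((Int × Int) × List Int)),
    (∀ p ∈ ps, List.Nodup p.2) →
    List.count v (ps.map (fun p => p.2)).flatten = ps.countP (fun kv => kv.2.contains v)
  | [], _ => rfl
  | p :: ps, h => by
    simp only [List.map_cons, List.flatten_cons, List.count_append, List.countP_cons]
    rw [count_flatten_eq_countP v ps (fun q hq => h q (List.mem_cons_of_mem _ hq))]
    by_cases hm : v ∈ p.2
    · have h1 : List.count v p.2 ≤ 1 := List.nodup_iff_count_le_one.mp (h p (List.mem_cons_self ..)) v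
      have h2 : 0 < List.count v p.2 := List.count_pos_iff.mpr hm
      have hc : p.2.contains v = true := List.contains_iff_mem.mpr hm
      rw [hc]; simp; omega
    · have h0 : List.count v p.2 = 0 := List.count_eq_zero_of_not_mem hm
      have hc : p.2.contains v = false := by
        rw [← Bool.not_eq_true]; intro hcc; exact hm (List.contains_iff_mem.mp hcc)
      rw [hc, h0]; simp

theorem countP_ge_two {α : Type} (p : α → Bool) (l : List α) (x y : α)
    (hx : x ∈ l) (hy : y ∈ l) (hxy : x ≠ y) (hpx : p x = true) (hpy : p y = true) :
    2 ≤ l.countP p := by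
  obtain ⟨l1, l2, rfl⟩ := List.append_of_mem hx
  have hy2 : y ∈ l1 ∨ y ∈ l2 := by
    rcases List.mem_append.1 hy with h | h
    · exact Or.inl h
    · rcases List.mem_cons.1 h with h' | h'
      · exact absurd h'.symm hxy
      · exact Or.inr h'
  rw [List.countP_append, List.countP_cons, if_pos hpx]
  rcases hy2 with h | h
  · have : 0 < l1.countP p := List.countP_pos_iff.mpr ⟨y, h, hpy⟩
    omega
  · have : 0 < l2.countP p := List.countP_pos_iff.mpr ⟨y, h, hpy⟩
    omega

theorem length_le_one_of_nodup_all_eq {α : Type} (m : List α) (hnd : m.Nodup) (a : α)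
    (h : ∀ x ∈ m, x = a) : m.length ≤ 1 := by
  match m, hnd with
  | [], _ => simp
  | [x], _ => simp
  | x :: y :: t, hnd =>
    exfalso
    have hx := h x (by simp)
    have hy := h y (by simp)
    rw [List.nodup_cons] at hnd
    exact hnd.1 (by rw [hx, ← hy]; exact List.mem_cons_self ..)

-- 'v survives subtracting every OTHER cell's set' ↔ 'v occurs in exactly one of the sets'
theorem uniq_countP_iff (d : PySem.Dict (Int × Int) (List Int)) (hk : d.keys.Nodup)
    (c : Int × Int) (s : List Int) (hmem : (c, s) ∈ d.items) (v : Int) (hvs : v ∈ s) :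
    (∀ p ∈ d.items, p.1 ≠ c → v ∉ p.2) ↔ d.items.countP (fun kv => kv.2.contains v) = 1 := by
  have hitems : d.items.Nodup := List.Nodup.of_map _ hk
  constructor
  · intro hall
    have hone : ∀ q ∈ d.items, (fun kv : (Int × Int) × List Int => kv.2.contains v) q = true → q = (c, s) := by
      intro q hq hqv
      have hv' : v ∈ q.2 := List.contains_iff_mem.mp hqv
      by_cases hq1 : q.1 = c
      · have e1 : d.get? q.1 = some q.2 := PySem.Dict.get?_of_mem_items d hq hk
        have e2 : d.get? c = some s := PySem.Dict.get?_of_mem_items d hmem hk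
        rw [hq1, e2] at e1
        obtain ⟨q1, q2⟩ := q
        simp only at hq1
        simp only [Option.some.injEq] at e1
        rw [hq1, ← e1]
      · exact absurd hv' (hall q hq hq1)
    rw [List.countP_eq_length_filter]
    have hfn : (d.items.filter (fun kv => kv.2.contains v)).Nodup := hitems.filter _
    have hle := length_le_one_of_nodup_all_eq _ hfn (c, s)
      (fun x hx => hone x (List.mem_filter.1 hx).1 (List.mem_filter.1 hx).2)
    have hin : (c, s) ∈ d.items.filter (fun kv => kv.2.contains v) :=
      List.mem_filter.2 ⟨hmem, List.contains_iff_mem.mpr hvs⟩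
    have hpos : 0 < (d.items.filter (fun kv => kv.2.contains v)).length := List.length_pos_of_mem hin
    omega
  · intro h1 p hp hp1 hv'
    have h2 := countP_ge_two (fun kv : (Int × Int) × List Int => kv.2.contains v) d.items (c, s) p
      hmem hp (fun he => hp1 (by rw [← he])) (List.contains_iff_mem.mpr hvs) (List.contains_iff_mem.mpr hv')
    omega

theorem pvDiffLoopA_cons (s : List Int) (kv : (Int × Int) × List Int) (rest : List ((Int × Int) × List Int)) :
    pvDiffLoopA s (kv :: rest) =
      if (PySem.Set.diff s kv.2).length = 0 then PySem.Set.diff s kv.2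
      else pvDiffLoopA (PySem.Set.diff s kv.2) rest := rfl

theorem pvDiffLoopA_eq : ∀ (l : List ((Int × Int) × List Int)) (s : List Int),
    pvDiffLoopA s l = s.filter (fun v => l.all (fun kv => !(kv.2.contains v)))
  | [], s => by simp [pvDiffLoopA]
  | kv :: rest, s => by
    rw [pvDiffLoopA_cons]
    have hdiff : PySem.Set.diff s kv.2 = s.filter (fun x => !(kv.2.contains x)) := rfl
    by_cases h : (PySem.Set.diff s kv.2).length = 0
    · rw [if_pos h]
      have hnil : s.filter (fun x => !(kv.2.contains x)) = [] := List.length_eq_zero_iff.mp (hdiff ▸ h)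
      rw [hdiff, hnil]
      symm
      rw [List.eq_nil_iff_forall_not_mem]
      intro v hv
      rw [List.mem_filter, List.all_cons, Bool.and_eq_true] at hv
      have : v ∈ s.filter (fun x => !(kv.2.contains x)) := List.mem_filter.2 ⟨hv.1, hv.2.1⟩
      rw [hnil] at this
      simp at this
    · rw [if_neg h, pvDiffLoopA_eq rest _, hdiff, List.filter_filter]
      apply List.filter_congr
      intro v _
      rw [List.all_cons]
      exact Bool.and_comm _ _

-- first match = head of the filtered list
theorem find?_eq_head?_filter {α : Type} (p : α → Bool) : ∀ (l : List α),
    l.find? p = (l.filter p).head?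
  | [] => rfl
  | x :: l => by
    cases h : p x with
    | true => simp [h]
    | false =>
      rw [List.find?_cons, List.filter_cons, h]
      exact find?_eq_head?_filter p l

-- a conditional-insert loop over fresh distinct keys appends exactly the hits, in order
theorem foldl_opt_insert_items (g : (Int × Int) → Option Int) :
    ∀ (l : List (Int × Int)) (u : PySem.Dict (Int × Int) Int), l.Nodup →
    (∀ k ∈ l, u.contains k = false) →
    (l.foldl (fun u k => match g k with | some v => u.insert k v | none => u) u).items
      = u.items ++ l.filterMap (fun k => (g k).map (fun v => (k, v)))
  | [], u, _, _ => by simp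
  | k :: l, u, hnd, hfresh => by
    rw [List.nodup_cons] at hnd
    cases hg : g k with
    | none =>
      simp only [List.foldl_cons, List.filterMap_cons, hg, Option.map_none]
      exact foldl_opt_insert_items g l u hnd.2
        (fun k' hk' => hfresh k' (List.mem_cons_of_mem _ hk'))
    | some v =>
      simp only [List.foldl_cons, List.filterMap_cons, hg, Option.map_some]
      rw [foldl_opt_insert_items g l (u.insert k v) hnd.2 ?_,
        PySem.Dict.items_insert_of_not_contains u v (hfresh k (List.mem_cons_self ..)),
        List.append_assoc]
      · rfl
      · intro k' hk'
        rw [PySem.Dict.contains_insert]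
        have hne : (k' == k) = false := by
          simp only [beq_eq_false_iff_ne]
          intro he; exact hnd.1 (he ▸ hk')
        rw [hne, hfresh k' (List.mem_cons_of_mem _ hk')]
        rfl

theorem ports_eq (cells : List (Int × Int)) (puzzle : List (List Int)) (possibles : List (List (List Int))) :
    unique_in_cells cells puzzle possibles = unique_in_cells_alt cells puzzle possibles := by
  rw [A_eq, B_eq]
  by_cases hlen : cells.length < 2
  · rw [if_pos hlen, if_pos hlen]
  · rw [if_neg hlen, if_neg hlen]
    obtain hk := pvBuild_nodup puzzle possibles cells
    obtain hval := pvBuild_val puzzle possibles cells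
    obtain hkeys := pvBuild_keys puzzle possibles cells
    set d := pvBuild puzzle possibles cells with hd
    set unfilled := pvUnfilled cells puzzle with hu
    set cnt : PySem.Dict Int Int :=
      unfilled.foldl (fun cnt c => (pvCand possibles c).foldl (fun cnt v => cnt.modify v 0 (· + 1)) cnt)
        PySem.Dict.empty with hcnt
    -- B's counts agree with the multiplicity of v among d's candidate sets
    have hvals : d.items.map (fun p => p.2) = unfilled.map (pvCand possibles) := by
      rw [← hkeys]
      show d.items.map (fun p => p.2) = (d.items.map (fun p => p.1)).map (pvCand possibles)
      rw [List.map_map]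
      exact List.map_congr_left (fun p hp => hval p hp)
    have hcnt2 : cnt = (unfilled.map (pvCand possibles)).foldl
        (fun c s => s.foldl (fun c v => c.modify v 0 (· + 1)) c) PySem.Dict.empty := by
      rw [hcnt, List.foldl_map]
    have hcntP : ∀ v : Int, cnt.getD v 0 = (d.items.countP (fun kv => kv.2.contains v) : Int) := by
      intro v
      rw [hcnt2, ← hvals, counts_getD,
        count_flatten_eq_countP v d.items
          (fun p hp => by rw [hval p hp]; exact PySem.Set.nodup_ofList _)]
    -- A's dict loop is the conditional-insert loop for pvGA d
    have hstep : d.keys.foldl (fun u cell =>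
        let cell_set := pvDiffLoopA (d.getD cell []) (d.erase cell).items
        if cell_set.length ≠ 0 then u.insert cell (cell_set.headD 0) else u) PySem.Dict.empty
        = d.keys.foldl (fun u k => match pvGA d k with | some v => u.insert k v | none => u)
            PySem.Dict.empty := by
      apply PySem.List.foldl_congr_mem
      intro u c _
      show _ = (match pvGA d c with | some v => u.insert c v | none => u)
      unfold pvGA
      by_cases h : (pvDiffLoopA (d.getD c []) (d.erase c).items).length ≠ 0 <;> simp [h]
    rw [hstep, foldl_opt_insert_items (pvGA d) d.keys PySem.Dict.empty hk
        (fun k _ => PySem.Dict.contains_empty k), hkeys]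
    show List.map _ (PySem.Dict.items PySem.Dict.empty ++ _) = _
    rw [show (PySem.Dict.empty : PySem.Dict (Int × Int) Int).items = [] from rfl,
      List.nil_append, List.map_filterMap]
    apply List.filterMap_congr
    intro c hc
    -- c is an unfilled cell: fetch its items entry
    have hc' : c ∈ d.keys := hkeys ▸ hc
    have hcont : d.contains c = true := (PySem.Dict.contains_iff_mem_keys d c).mpr hc'
    have hsome : (d.get? c).isSome = true := by
      rw [← PySem.Dict.contains_eq_isSome_get?]; exact hcont
    obtain ⟨s, hgs⟩ := Option.isSome_iff_exists.mp hsome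
    have hp : (c, s) ∈ d.items := PySem.Dict.mem_items_of_get?_eq_some d hgs
    have hs : s = pvCand possibles c := hval (c, s) hp
    subst hs
    have hget : d.getD c [] = pvCand possibles c := PySem.Dict.getD_of_mem_items d hp hk []
    -- A's surviving set = the candidates with global count 1
    have hX : pvDiffLoopA (d.getD c []) (d.erase c).items
        = (pvCand possibles c).filter (fun v => cnt.getD v 0 == 1) := by
      rw [hget, pvDiffLoopA_eq,
        show (d.erase c).items = d.items.filter (fun p => !(p.1 == c)) from rfl]
      apply List.filter_congr
      intro v hv
      have hiff := uniq_countP_iff d hk c (pvCand possibles c) hp v hv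
      rw [hcntP v]
      rcases hcv : ((d.items.countP (fun p => p.2.contains v) : Int) == 1) with _ | _
      · rw [beq_eq_false_iff_ne] at hcv
        have hne : d.items.countP (fun p => p.2.contains v) ≠ 1 := by
          intro hh; exact hcv (by exact_mod_cast hh)
        rw [← Bool.not_eq_true]
        intro hall
        apply hne
        apply hiff.1
        intro p hp' hp1 hv'
        rw [List.all_eq_true] at hall
        have := hall p (List.mem_filter.2 ⟨hp', by simp [hp1]⟩)
        simp only [Bool.not_eq_true'] at this
        exact (by rw [List.contains_iff_mem.mpr hv'] at this; exact Bool.true_eq_false.mp this)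
      · rw [beq_iff_eq] at hcv
        have h1 : d.items.countP (fun p => p.2.contains v) = 1 := by exact_mod_cast hcv
        rw [List.all_eq_true]
        intro p hp'
        rw [List.mem_filter] at hp'
        have hp1 : p.1 ≠ c := by
          have := hp'.2
          simp only [Bool.not_eq_true'] at this
          exact fun he => by rw [he] at this; simp at this
        have := (hiff.2 h1) p hp'.1 hp1
        simp [this]
    -- first-with-count-1 = head of the surviving set, as Options
    rw [Option.map_map]
    have hopt : pvGA d c = (pvCand possibles c).find? (fun v => cnt.getD v 0 == 1) := by
      unfold pvGA
      rw [hX, find?_eq_head?_filter]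
      cases (pvCand possibles c).filter (fun v => cnt.getD v 0 == 1) with
      | nil => simp
      | cons x xs => simp
    rw [hopt]
    rfl

-- ===== VERDICT (by name: the statement is the Claim_ definition above) =====
theorem unique_in_cells_spec : Claim_equal_unique_in_cells := by
  intro cells puzzle possibles _ _
  unfold Spec_unique_in_cells
  exact ports_eq cells puzzle possibles
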